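-- pv_equiv track=rewrite | github.com/syedmujtaba-10/Attention_Viz | model.py | make_tokens_unique
-- ===== SOURCE A (Python) =====
-- from collections import Counter
--
-- def make_tokens_unique(tokens):
--     """Appends a count to duplicate tokens to ensure uniqueness."""
--     counts = Counter()
--     unique_tokens = []
--     for token in tokens:
--         if counts[token] > 0:
--             unique_tokens.append(f"{token}_{counts[token]}")  # Add index to duplicates
--         else:
--             unique_tokens.append(token)
--         counts[token] += 1
--     return unique_tokens
-- ===== SOURCE B (Python) =====
-- def make_tokens_unique(tokens):
--     """Appends a count to duplicate tokens to ensure uniqueness."""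
--     positions = {}
--     for i, token in enumerate(tokens):
--         positions.setdefault(token, []).append(i)
--     result = [None] * len(tokens)
--     for token, ps in positions.items():
--         for k, p in enumerate(ps):
--             result[p] = token if k == 0 else f"{token}_{k}"
--     return result
-- ===== Notes on version B (the rewrite author's own statement) =====
-- stated objective: alternative
-- what changed: Group-and-scatter instead of a running counter: B first builds a dict mapping each token to its ordered list of occurrence positions, then for each group scatters the bare/suffixed names into a preallocated result list, rather than A's single left-to-right pass maintaining a Counter.
import Mathlib
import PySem

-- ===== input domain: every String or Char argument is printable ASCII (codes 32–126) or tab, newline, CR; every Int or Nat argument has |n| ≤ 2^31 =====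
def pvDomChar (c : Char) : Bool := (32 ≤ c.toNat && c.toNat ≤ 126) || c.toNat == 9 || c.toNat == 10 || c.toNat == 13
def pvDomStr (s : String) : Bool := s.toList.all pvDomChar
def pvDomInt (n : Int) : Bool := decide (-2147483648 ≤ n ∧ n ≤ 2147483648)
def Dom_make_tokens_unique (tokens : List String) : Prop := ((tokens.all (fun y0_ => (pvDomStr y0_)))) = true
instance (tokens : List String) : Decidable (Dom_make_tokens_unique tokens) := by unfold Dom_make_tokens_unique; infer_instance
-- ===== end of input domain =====

-- B replaces A's single pass with a running Counter by group-and-scatter: for each distinct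
-- token, collect its occurrence positions and write the bare/suffixed names into a
-- preallocated result list. Alternative decomposition, not faster.

-- ===== PORT A =====
-- the body of A's for-loop: counts[token] lookup, append, counts[token] += 1
def pvStepA (st : PySem.Dict String Int × List String) (token : String) :
    PySem.Dict String Int × List String :=
  let c := st.1.getD token 0
  let ut := if c > 0 then st.2 ++ [token ++ "_" ++ PySem.Int.toStr c] else st.2 ++ [token]
  (st.1.modify token 0 (· + 1), ut)

def make_tokens_unique (tokens : List String) : List String :=
  (tokens.foldl pvStepA (PySem.Dict.empty, [])).2

-- ===== PORT B =====
-- B's first pass: for i, token in enumerate(tokens): positions.setdefault(token, []).append(i)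
def pvPositionsDict (tokens : List String) : PySem.Dict String (List Int) :=
  (PySem.List.enumerate tokens).foldl (fun d it => d.modify it.2 [] (· ++ [it.1])) PySem.Dict.empty

-- B's inner loop for one item (token, ps): for k, p in enumerate(ps): result[p] = ….
-- result[p] = v is ported with pySetD; exact here because every p comes from enumerate(tokens),
-- so 0 ≤ p < len(result) and Python never raises.
def pvScatter (r : List (Option String)) (tp : String × List Int) : List (Option String) :=
  (PySem.List.enumerate tp.2).foldl
    (fun r kp => PySem.List.pySetD r kp.2
      (some (if kp.1 = 0 then tp.1 else tp.1 ++ "_" ++ PySem.Int.toStr kp.1))) r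

-- [None] * len(tokens) is List.replicate (length) none; positions.items() is Dict.items;
-- the final `getD ""` only unwraps the Options (every slot holds `some _`, proved below).
def make_tokens_unique_alt (tokens : List String) : List String :=
  (((pvPositionsDict tokens).items).foldl pvScatter
      (List.replicate tokens.length none)).map (fun o => o.getD "")

-- ===== PRECONDITION & SPEC =====
def Spec_make_tokens_unique (tokens : List String) (out : List String) : Prop := out = make_tokens_unique_alt tokens
instance (tokens : List String) (out : List String) : Decidable (Spec_make_tokens_unique tokens out) := by unfold Spec_make_tokens_unique; infer_instance

-- ===== CLAIM (what is proved, stated in full; the proofs are below) =====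
def Claim_equal_make_tokens_unique : Prop := ∀ (tokens : List String), Dom_make_tokens_unique tokens → Spec_make_tokens_unique tokens (make_tokens_unique tokens)

-- ===== LEMMAS AND PROOFS =====

-- reference value of the output at index i: the token, suffixed by its count in the prefix
def pvMk (tokens : List String) (i : Nat) : String :=
  let t := tokens.getD i ""
  let c := (tokens.take i).count t
  if c = 0 then t else t ++ "_" ++ PySem.Int.toStr (c : Int)

-- proof-side view of B's scatter for one token, with its positions spelled out
def pvWriteGroup (tokens : List String) (res : List (Option String)) (token : String) :
    List (Option String) :=
  pvScatter res (token, ((PySem.List.enumerate tokens).filter (fun it => it.2 == token)).map (·.1))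

-- A-side reference: output element for each token of ts after the already-seen prefix p
def pvG : List String → List String → List String
  | _, [] => []
  | p, t :: ts =>
      (if p.count t = 0 then t else t ++ "_" ++ PySem.Int.toStr ((p.count t : Nat) : Int))
        :: pvG (p ++ [t]) ts

-- A's fold equals pvG, given the counter agrees with the prefix counts
theorem pvA_loop (ts : List String) : ∀ (p acc : List String) (d : PySem.Dict String Int),
    (∀ t, d.getD t 0 = ((p.count t : Nat) : Int)) →
    (ts.foldl pvStepA (d, acc)).2 = acc ++ pvG p ts := by
  induction ts with
  | nil => intro p acc d _; simp [pvG]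
  | cons t ts ih =>
      intro p acc d hd
      have hc := hd t
      rw [List.foldl_cons]
      have hF : pvStepA (d, acc) t =
          (d.modify t 0 (· + 1),
           acc ++ [if p.count t = 0 then t
                   else t ++ "_" ++ PySem.Int.toStr ((p.count t : Nat) : Int)]) := by
        simp only [pvStepA, hc]
        by_cases h0 : p.count t = 0
        · have hnp : ¬ ((p.count t : Nat) : Int) > 0 := by omega
          rw [if_neg hnp, if_pos h0]
        · have hpos : ((p.count t : Nat) : Int) > 0 := by omega
          rw [if_pos hpos, if_neg h0]
      rw [hF, ih (p ++ [t]) _ _ ?hnew]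
      · rw [pvG]; simp [List.append_assoc]
      case hnew =>
        intro t'
        by_cases h : t' = t
        · subst h
          rw [PySem.Dict.getD_modify_self, hd]
          simp
        · rw [PySem.Dict.getD_modify_of_ne _ _ _ h, hd]
          simp [List.count_append, Ne.symm h]

theorem pvG_length (ts : List String) : ∀ p, (pvG p ts).length = ts.length := by
  induction ts with
  | nil => intro p; simp [pvG]
  | cons t ts ih => intro p; simp [pvG, ih]

theorem pvG_getElem? (ts : List String) : ∀ (p : List String) (k : Nat), k < ts.length →
    (pvG p ts)[k]? = some (pvMk (p ++ ts) (p.length + k)) := by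
  induction ts with
  | nil => intro p k h; simp at h
  | cons t ts ih =>
      intro p k h
      cases k with
      | zero =>
          simp only [pvG, List.getElem?_cons_zero, pvMk, Nat.add_zero]
          simp [List.getD]
      | succ k =>
          simp only [pvG, List.getElem?_cons_succ]
          rw [ih (p ++ [t]) k (by simpa using h)]
          congr 2
          · simp
          · simp [List.length_append]; omega

theorem pvA_getElem? (tokens : List String) (i : Nat) :
    (make_tokens_unique tokens)[i]? =
      if i < tokens.length then some (pvMk tokens i) else none := by
  have hA : make_tokens_unique tokens = pvG [] tokens := by
    rw [make_tokens_unique, pvA_loop tokens [] [] PySem.Dict.empty (by intro t; simp)]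
    rfl
  rw [hA]
  by_cases hi : i < tokens.length
  · rw [if_pos hi, pvG_getElem? tokens [] i hi]
    simp
  · rw [if_neg hi, List.getElem?_eq_none (by rw [pvG_length]; omega)]

theorem pv_rank_count (p : Nat → Bool) : ∀ (n k i : Nat),
    ((List.range n).filter p)[k]? = some i →
    ((List.range i).filter p).length = k := by
  intro n
  induction n with
  | zero => intro k i h; simp at h
  | succ n ih =>
      intro k i h
      rw [List.range_succ, List.filter_append] at h
      by_cases hk : k < ((List.range n).filter p).length
      · rw [List.getElem?_append, if_pos hk] at h
        exact ih k i h
      · rw [List.getElem?_append, if_neg hk] at h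
        rcases hp : p n with _ | _ <;> simp only [List.filter_singleton, hp] at h
        · simp at h
        · rcases Nat.eq_or_lt_of_le (Nat.not_lt.mp hk) with he | hlt
          · rw [← he] at h
            simp at h
            subst h
            omega
          · rw [List.getElem?_eq_none (by simp; omega)] at h
            simp at h

theorem pv_count_prefix (l : List String) (t : String) : ∀ i, i ≤ l.length →
    (l.take i).count t = ((List.range i).filter (fun j => l.getD j "" == t)).length := by
  intro i
  induction i with
  | zero => intro _; simp
  | succ i ih =>
      intro h
      rw [List.take_add_one, List.range_succ, List.filter_append, List.count_append]
      rw [ih (by omega)]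
      have hg : l[i]? = some (l.getD i "") := by
        simp [List.getD, List.getElem?_eq_getElem (by omega : i < l.length)]
      rw [hg]
      simp only [Option.toList_some, List.filter_singleton]
      by_cases he : l[i]?.getD "" = t <;> simp [he, Bool.cond_eq_ite]

theorem pv_positions_eq (tokens : List String) (token : String) :
    ((PySem.List.enumerate tokens).filter (fun it => it.2 == token)).map (·.1)
      = ((List.range tokens.length).filter (fun i => tokens.getD i "" == token)).map (fun j : Nat => (j : Int)) := by
  rw [PySem.List.enumerate_eq_map_pyRange (d := "")]
  simp only [PySem.List.len, PySem.List.pyRange_zero_natCast]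
  simp [List.filter_map, List.map_map, Function.comp_def, PySem.List.pyGetD_natCast, List.getD]

theorem pv_find?_of_nodup {α : Type} (x : Int) (v : α) : ∀ (ws : List (Int × α)),
    (x, v) ∈ ws → (ws.map (·.1)).Nodup →
    ws.find? (fun w => w.1 == x) = some (x, v) := by
  intro ws
  induction ws with
  | nil => intro h _; simp at h
  | cons w ws ih =>
      intro hm hnd
      simp only [List.map_cons, List.nodup_cons] at hnd
      rcases List.mem_cons.mp hm with he | hm'
      · subst he; simp
      · have hxm : x ∈ ws.map (·.1) := List.mem_map.mpr ⟨(x, v), hm', rfl⟩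
        have hne : w.1 ≠ x := fun hx => hnd.1 (hx ▸ hxm)
        rw [List.find?_cons_of_neg (by simpa using hne)]
        exact ih hm' hnd.2

theorem pv_foldl_set_getElem? : ∀ (ws : List (Int × Option String)) (res : List (Option String))
    (i : Nat), (∀ w ∈ ws, 0 ≤ w.1) → (ws.map (·.1)).Nodup →
    (ws.foldl (fun r w => PySem.List.pySetD r w.1 w.2) res)[i]? =
      match ws.find? (fun w => w.1 == (i : Int)) with
      | some w => if i < res.length then some w.2 else none
      | none => res[i]? := by
  intro ws
  induction ws with
  | nil => intro res i _ _; simp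
  | cons w ws ih =>
      intro res i hpos hnd
      simp only [List.map_cons, List.nodup_cons] at hnd
      rw [List.foldl_cons]
      have hw0 : 0 ≤ w.1 := hpos w (by simp)
      have hset : PySem.List.pySetD res w.1 w.2 = res.set w.1.toNat w.2 :=
        PySem.List.pySetD_of_nonneg res w.2 hw0
      have hlen : (PySem.List.pySetD res w.1 w.2).length = res.length := by
        rw [hset]; simp
      rw [ih _ i (fun w' h => hpos w' (by simp [h])) hnd.2]
      by_cases hx : w.1 = (i : Int)
      · have hfind : ws.find? (fun w' => w'.1 == (i : Int)) = none := by
          rw [List.find?_eq_none]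
          intro w' hw'
          have : w'.1 ∈ ws.map (·.1) := List.mem_map.mpr ⟨w', hw', rfl⟩
          simp only [beq_iff_eq]
          intro hc
          exact hnd.1 (by rw [hx]; rw [hc] at this; exact this)
        rw [List.find?_cons_of_pos (by simpa using hx), hfind, hlen, hset]
        have hti : w.1.toNat = i := by omega
        rw [hti]
        by_cases hi : i < res.length
        · simp [hi]
        · simp [hi]
      · rw [List.find?_cons_of_neg (by simpa using hx)]
        have hne : w.1.toNat ≠ i := by omega
        cases hfind : ws.find? (fun w' => w'.1 == (i : Int)) with
        | some w' => rw [hlen]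
        | none => rw [hset, List.getElem?_set_ne hne]

theorem pv_foldl_set_length : ∀ (ws : List (Int × Option String)) (res : List (Option String)),
    (ws.foldl (fun r w => PySem.List.pySetD r w.1 w.2) res).length = res.length := by
  intro ws
  induction ws with
  | nil => intro res; rfl
  | cons w ws ih => intro res; rw [List.foldl_cons, ih, PySem.List.length_pySetD]

def pvWs (tokens : List String) (token : String) : List (Int × Option String) :=
  (PySem.List.enumerate (((PySem.List.enumerate tokens).filter (fun it => it.2 == token)).map (·.1))).map
    (fun kp => (kp.2, some (if kp.1 = 0 then token else token ++ "_" ++ PySem.Int.toStr kp.1)))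

theorem pv_write_eq (tokens : List String) (res : List (Option String)) (token : String) :
    pvWriteGroup tokens res token =
      (pvWs tokens token).foldl (fun r w => PySem.List.pySetD r w.1 w.2) res := by
  rw [pvWriteGroup, pvScatter, pvWs, List.foldl_map]

theorem pv_ws_fst (tokens : List String) (token : String) :
    (pvWs tokens token).map (·.1)
      = ((List.range tokens.length).filter (fun i => tokens.getD i "" == token)).map (fun j : Nat => (j : Int)) := by
  rw [pvWs, List.map_map]
  have h : ((fun w : Int × Option String => w.1) ∘
      (fun kp : Int × Int => (kp.2, some (if kp.1 = 0 then token else token ++ "_" ++ PySem.Int.toStr kp.1))))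
      = (fun kp : Int × Int => kp.2) := rfl
  rw [h, PySem.List.map_snd_enumerate, pv_positions_eq]

theorem pv_ws_fst_nodup (tokens : List String) (token : String) :
    ((pvWs tokens token).map (·.1)).Nodup := by
  rw [pv_ws_fst]
  exact (List.Nodup.filter _ (List.nodup_range)).map (fun a b h => by exact_mod_cast h)

theorem pv_write_length (tokens : List String) (res : List (Option String)) (token : String) :
    (pvWriteGroup tokens res token).length = res.length := by
  rw [pv_write_eq, pv_foldl_set_length]

theorem pv_write_getElem? (tokens : List String) (token : String) (res : List (Option String))
    (hlen : res.length = tokens.length) (i : Nat) :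
    (pvWriteGroup tokens res token)[i]? =
      if i < tokens.length ∧ tokens.getD i "" = token then some (some (pvMk tokens i))
      else res[i]? := by
  have hpos : ∀ w ∈ pvWs tokens token, 0 ≤ w.1 := by
    intro w hw
    have hm : w.1 ∈ (pvWs tokens token).map (·.1) := List.mem_map.mpr ⟨w, hw, rfl⟩
    rw [pv_ws_fst] at hm
    obtain ⟨j, _, hj⟩ := List.mem_map.mp hm
    omega
  rw [pv_write_eq, pv_foldl_set_getElem? _ _ _ hpos (pv_ws_fst_nodup tokens token)]
  by_cases hp : i < tokens.length ∧ tokens.getD i "" = token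
  · obtain ⟨hin, heq⟩ := hp
    have hiocc : i ∈ (List.range tokens.length).filter (fun j => tokens.getD j "" == token) :=
      List.mem_filter.mpr ⟨List.mem_range.mpr hin, by simpa [List.getD] using heq⟩
    obtain ⟨k, hk, hik⟩ := List.mem_iff_getElem.mp hiocc
    have hocck : ((List.range tokens.length).filter (fun j => tokens.getD j "" == token))[k]? = some i := by
      rw [List.getElem?_eq_getElem hk, hik]
    have hmem : ((i : Int), some (if (k : Int) = 0 then token
        else token ++ "_" ++ PySem.Int.toStr (k : Int))) ∈ pvWs tokens token := by
      apply List.mem_of_getElem? (i := k)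
      rw [pvWs, List.getElem?_map, PySem.List.getElem?_enumerate, pv_positions_eq,
        List.getElem?_map, hocck]
      simp
    have hrank : (tokens.take i).count token = k := by
      rw [pv_count_prefix tokens token i (Nat.le_of_lt hin)]
      exact pv_rank_count _ _ _ _ hocck
    have hmk : pvMk tokens i = if (k : Int) = 0 then token
        else token ++ "_" ++ PySem.Int.toStr (k : Int) := by
      rw [pvMk]
      simp only [heq, hrank]
      by_cases hk0 : k = 0
      · simp [hk0]
      · rw [if_neg hk0, if_neg (by exact_mod_cast hk0)]
    rw [pv_find?_of_nodup _ _ _ hmem (pv_ws_fst_nodup tokens token)]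
    show (if i < res.length then some (some (if (k : Int) = 0 then token
        else token ++ "_" ++ PySem.Int.toStr (k : Int))) else none) = _
    rw [if_pos (show i < res.length by omega),
      if_pos (⟨hin, heq⟩ : i < tokens.length ∧ tokens.getD i "" = token), hmk]
  · rw [if_neg hp]
    have hfind : (pvWs tokens token).find? (fun w => w.1 == (i : Int)) = none := by
      rw [List.find?_eq_none]
      intro w hw
      have hm : w.1 ∈ (pvWs tokens token).map (·.1) := List.mem_map.mpr ⟨w, hw, rfl⟩
      rw [pv_ws_fst] at hm
      obtain ⟨j, hj, hji⟩ := List.mem_map.mp hm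
      have hj' := List.mem_filter.mp hj
      simp only [beq_iff_eq]
      intro hc
      have hji' : j = i := by omega
      subst hji'
      exact hp ⟨List.mem_range.mp hj'.1, by simpa [List.getD] using hj'.2⟩
    rw [hfind]

theorem pv_outer_getElem? (tokens : List String) : ∀ (ds : List String) (res : List (Option String)),
    res.length = tokens.length → ∀ i,
    (ds.foldl (pvWriteGroup tokens) res)[i]? =
      if i < tokens.length ∧ tokens.getD i "" ∈ ds then some (some (pvMk tokens i))
      else res[i]? := by
  intro ds
  induction ds with
  | nil => intro res _ i; simp
  | cons t ds ih =>
      intro res hlen i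
      rw [List.foldl_cons, ih _ (by rw [pv_write_length]; exact hlen) i,
        pv_write_getElem? tokens t res hlen i]
      by_cases h1 : i < tokens.length
      · by_cases h2 : tokens.getD i "" ∈ ds
        · rw [if_pos ⟨h1, h2⟩, if_pos ⟨h1, List.mem_cons.mpr (Or.inr h2)⟩]
        · rw [if_neg (fun hc => h2 hc.2)]
          by_cases h3 : tokens.getD i "" = t
          · rw [if_pos ⟨h1, h3⟩, if_pos ⟨h1, List.mem_cons.mpr (Or.inl h3)⟩]
          · rw [if_neg (fun hc => h3 hc.2), if_neg (fun hc => by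
              rcases List.mem_cons.mp hc.2 with h | h
              · exact h3 h
              · exact h2 h)]
      · rw [if_neg (fun hc => h1 hc.1), if_neg (fun hc => h1 hc.1), if_neg (fun hc => h1 hc.1)]

theorem pv_dict_getD (tokens : List String) (t : String) :
    (pvPositionsDict tokens).getD t []
      = ((PySem.List.enumerate tokens).filter (fun it => it.2 == t)).map (·.1) := by
  have hswap : (PySem.List.enumerate tokens).foldl
      (fun d it => d.modify it.2 [] (· ++ [it.1])) PySem.Dict.empty
      = ((PySem.List.enumerate tokens).map Prod.swap).foldl
          (fun d p => d.modify p.1 [] (· ++ [p.2])) PySem.Dict.empty :=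
    Eq.symm (by exact List.foldl_map)
  rw [pvPositionsDict, hswap, PySem.Dict.getD_foldl_modify_append]
  simp [List.filter_map, List.map_map, Function.comp_def, Prod.swap]

theorem pv_dict_keys (tokens : List String) :
    (pvPositionsDict tokens).keys = PySem.List.dedup tokens := by
  rw [pvPositionsDict, PySem.Dict.keys_foldl_modify_key (key := fun it : Int × String => it.2)
    (f := fun _ it => (· ++ [it.1]))]
  rw [PySem.List.map_snd_enumerate]
  simp [PySem.List.dedup_eq_ofList, PySem.Set.ofList_eq_foldl, PySem.Set.update,
    PySem.Dict.keys_empty]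

theorem pv_dict_keys_nodup (tokens : List String) : (pvPositionsDict tokens).keys.Nodup := by
  rw [pv_dict_keys]
  exact PySem.List.nodup_dedup tokens

theorem pv_alt_eq (tokens : List String) :
    make_tokens_unique_alt tokens
      = ((PySem.List.dedup tokens).foldl (pvWriteGroup tokens)
          (List.replicate tokens.length none)).map (fun o => o.getD "") := by
  rw [make_tokens_unique_alt,
    PySem.Dict.items_eq_map_keys _ (pv_dict_keys_nodup tokens) [],
    List.foldl_map, pv_dict_keys]
  congr 1
  apply PySem.List.foldl_congr_mem
  intro acc t _
  rw [pv_dict_getD, pvWriteGroup]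

theorem pvB_getElem? (tokens : List String) (i : Nat) :
    (make_tokens_unique_alt tokens)[i]? =
      if i < tokens.length then some (pvMk tokens i) else none := by
  rw [pv_alt_eq, List.getElem?_map,
    pv_outer_getElem? tokens _ _ (by simp) i]
  by_cases hi : i < tokens.length
  · rw [if_pos ⟨hi, by
      rw [PySem.List.mem_dedup]
      have : tokens.getD i "" = tokens[i] := by
        simp [List.getD, List.getElem?_eq_getElem hi]
      rw [this]
      exact List.getElem_mem hi⟩, if_pos hi]
    rfl
  · rw [if_neg (fun hc => hi hc.1), if_neg hi,
      List.getElem?_eq_none (l := List.replicate tokens.length none) (by simp; omega)]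
    rfl

-- ===== VERDICT (by name: the statement is the Claim_ definition above) =====
theorem make_tokens_unique_spec : Claim_equal_make_tokens_unique := by
  intro tokens _
  unfold Spec_make_tokens_unique
  apply List.ext_getElem?
  intro i
  rw [pvA_getElem?, pvB_getElem?]
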